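-- pv_equiv track=rewrite | github.com/yaolisi/perilla | backend/core/runtimes/torch/stream_hf.py | emit_stream_chunks
-- ===== SOURCE A (Python) =====
-- from typing import Any, Dict, Iterator, Iterable, List, Optional
--
-- def _earliest_stop_index(acc: str, stop: Optional[List[str]]) -> Optional[int]:
--     if not stop:
--         return None
--     earliest: Optional[int] = None
--     for s in stop:
--         idx = acc.find(s)
--         if idx != -1 and (earliest is None or idx < earliest):
--             earliest = idx
--     return earliest
--
-- def emit_stream_chunks(streamer: Iterable[str], stop: Optional[List[str]]) -> Iterator[str]:
--     """
--     将 HF TextIteratorStreamer（或任意字符串迭代器）转为带 stop 截断的片段序列。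
--     纯函数，便于单测。
--     """
--     yielded_chars = 0
--     acc = ""
--     for text in streamer:
--         if not text:
--             continue
--         acc += text
--         cut_at = _earliest_stop_index(acc, stop)
--         if cut_at is not None:
--             prefix = acc[:cut_at]
--             chunk = prefix[yielded_chars:]
--             if chunk:
--                 yield chunk
--             return
--         yield text
--         yielded_chars += len(text)
-- ===== SOURCE B (Python) =====
-- from typing import Iterable, Iterator, List, Optional
--
-- def emit_stream_chunks(streamer: Iterable[str], stop: Optional[List[str]]) -> Iterator[str]:
--     """Same chunk stream, computed without re-scanning (or even keeping) the whole
--     accumulated text: only a sliding tail window of max_stop_len-1 chars plus the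
--     new text can contain a fresh stop-string occurrence."""
--     stops = stop if stop else []
--     if not stops:
--         for t in streamer:
--             if t:
--                 yield t
--         return
--     max_len = 0
--     for s in stops:
--         max_len = max(max_len, len(s))
--     keep = max_len - 1 if max_len > 0 else 0
--     old = 0      # chars of accumulated text so far (all already yielded)
--     tail = ""    # last `keep` chars of the accumulated text
--     for text in streamer:
--         if not text:
--             continue
--         window = tail + text
--         offset = old - len(tail)     # window == acc[offset:]
--         cut = None
--         for s in stops:
--             i = window.find(s)
--             if i != -1:
--                 pos = offset + i
--                 if cut is None or pos < cut:
--                     cut = pos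
--         if cut is not None:
--             if cut > old:
--                 yield text[:cut - old]
--             return
--         yield text
--         old += len(text)
--         tail = window[-keep:] if keep else ""
-- ===== Notes on version B (the rewrite author's own statement) =====
-- stated objective: alternative
-- what changed: B drops the growing accumulator entirely: it keeps only the last max_stop_len-1 characters as a sliding tail window and searches stop strings in tail+new_text (any fresh occurrence must overlap the new text), instead of re-scanning the whole accumulated string after every chunk.
import Mathlib
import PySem

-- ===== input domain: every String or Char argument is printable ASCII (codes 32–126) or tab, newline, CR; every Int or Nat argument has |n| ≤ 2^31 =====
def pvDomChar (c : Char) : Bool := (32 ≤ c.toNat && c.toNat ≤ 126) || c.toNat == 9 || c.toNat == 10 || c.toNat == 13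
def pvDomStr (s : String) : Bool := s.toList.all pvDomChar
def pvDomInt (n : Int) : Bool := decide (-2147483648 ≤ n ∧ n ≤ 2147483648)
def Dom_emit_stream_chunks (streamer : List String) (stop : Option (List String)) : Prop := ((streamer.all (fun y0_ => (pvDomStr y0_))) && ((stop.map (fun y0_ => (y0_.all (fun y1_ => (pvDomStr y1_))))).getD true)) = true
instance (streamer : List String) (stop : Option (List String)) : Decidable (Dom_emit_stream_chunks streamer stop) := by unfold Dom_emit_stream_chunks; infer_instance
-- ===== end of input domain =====

-- B replaces A's rescan of the whole accumulated string after every chunk by a sliding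
-- tail window of max_stop_len-1 characters (objective: alternative algorithm, same values;
-- A and B are generators, ported as the list of yielded chunks).

-- ===== PORT A =====
-- _earliest_stop_index(acc, stop)
def earliestStopIndexA (acc : List Char) (stop : Option (List String)) : Option Int :=
  match stop with
  | none => none
  | some ss =>
    if ss = [] then none            -- `if not stop`
    else
      ss.foldl (fun earliest s =>
        let idx := PySem.Chars.find acc s.toList
        if idx = -1 then earliest
        else match earliest with
          | none => some idx
          | some e => if idx < e then some idx else earliest) none

-- the `for text in streamer` loop of A, state (yielded_chars, acc), chunks accumulated in out
def emitLoopA (stop : Option (List String)) : List String → Int → List Char → List String → List String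
  | [], _, _, out => out
  | text :: rest, yielded, acc, out =>
    if text = "" then emitLoopA stop rest yielded acc out
    else
      let acc' := acc ++ text.toList
      match earliestStopIndexA acc' stop with
      | some cut =>
        let pre := PySem.List.slice acc' none (some cut)        -- acc[:cut_at]
        let chunk := PySem.List.slice pre (some yielded) none   -- prefix[yielded_chars:]
        if chunk = [] then out else out ++ [String.ofList chunk]
      | none => emitLoopA stop rest (yielded + PySem.Str.len text) acc' (out ++ [text])

def emit_stream_chunks (streamer : List String) (stop : Option (List String)) : List String :=
  emitLoopA stop streamer 0 [] []

-- ===== PORT B =====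
-- the inner `for s in stops` scan of B over window = tail + text
def earliestStopIndexB (window : List Char) (offset : Int) (stops : List String) : Option Int :=
  stops.foldl (fun cut s =>
    let i := PySem.Chars.find window s.toList
    if i = -1 then cut
    else
      let pos := offset + i
      match cut with
      | none => some pos
      | some c => if pos < c then some pos else cut) none

-- the `for text in streamer` loop of B, state (old, tail)
def emitLoopB (stops : List String) (keep : Int) : List String → Int → List Char → List String → List String
  | [], _, _, out => out
  | text :: rest, old, tail, out =>
    if text = "" then emitLoopB stops keep rest old tail out
    else
      let window := tail ++ text.toList
      let offset := old - PySem.List.len tail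
      match earliestStopIndexB window offset stops with
      | some cut =>
        if old < cut then
          out ++ [String.ofList (PySem.List.slice text.toList none (some (cut - old)))]   -- text[:cut-old]
        else out
      | none =>
        emitLoopB stops keep rest (old + PySem.Str.len text)
          (if keep = 0 then [] else PySem.List.slice window (some (-keep)) none)          -- window[-keep:]
          (out ++ [text])

def emit_stream_chunks_alt (streamer : List String) (stop : Option (List String)) : List String :=
  let stops := match stop with | none => ([] : List String) | some ss => ss   -- `stop if stop else []`
  if stops = [] then
    streamer.foldl (fun out t => if t = "" then out else out ++ [t]) []
  else
    let maxLen := stops.foldl (fun m s => max m (PySem.Str.len s)) 0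
    let keep := if 0 < maxLen then maxLen - 1 else 0
    emitLoopB stops keep streamer 0 [] []

-- ===== PRECONDITION & SPEC =====
def Spec_emit_stream_chunks (streamer : List String) (stop : Option (List String)) (out : List String) : Prop := out = emit_stream_chunks_alt streamer stop
instance (streamer : List String) (stop : Option (List String)) (out : List String) : Decidable (Spec_emit_stream_chunks streamer stop out) := by unfold Spec_emit_stream_chunks; infer_instance

-- ===== CLAIM (what is proved, stated in full; the proofs are below) =====
def Claim_equal_emit_stream_chunks : Prop := ∀ (streamer : List String) (stop : Option (List String)), Dom_emit_stream_chunks streamer stop → Spec_emit_stream_chunks streamer stop (emit_stream_chunks streamer stop)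

-- ===== LEMMAS AND PROOFS =====

-- the two inner-scan step functions, named for the proofs (definitionally the lambdas in the ports)
def stepA (acc : List Char) (earliest : Option Int) (s : String) : Option Int :=
  let idx := PySem.Chars.find acc s.toList
  if idx = -1 then earliest
  else match earliest with
    | none => some idx
    | some e => if idx < e then some idx else earliest

def stepB (window : List Char) (offset : Int) (cut : Option Int) (s : String) : Option Int :=
  let i := PySem.Chars.find window s.toList
  if i = -1 then cut
  else
    let pos := offset + i
    match cut with
    | none => some pos
    | some c => if pos < c then some pos else cut

lemma earliestA_eq (L : List Char) (ss : List String) :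
    earliestStopIndexA L (some ss) = if ss = [] then none else ss.foldl (stepA L) none := rfl

lemma earliestB_eq (window : List Char) (offset : Int) (ss : List String) :
    earliestStopIndexB window offset ss = ss.foldl (stepB window offset) none := rfl

-- an occurrence of s fully inside acc would contradict ¬ s <:+: acc
lemma occ_lower_bound (acc ext s : List Char) (hni : ¬ s <:+: acc) (p : Nat)
    (hp : s <+: (acc ++ ext).drop p) : acc.length + 1 ≤ p + s.length := by
  by_contra h
  have hple : p ≤ acc.length := by omega
  have hlen : s.length ≤ (acc.drop p).length := by simp; omega
  rw [List.drop_append_of_le_length hple] at hp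
  have hs : s = ((acc.drop p) ++ ext).take s.length := List.prefix_iff_eq_take.mp hp
  rw [List.take_append_of_le_length hlen] at hs
  have hpre : s <+: acc.drop p := by rw [hs]; exact List.take_prefix _ _
  exact hni (hpre.isInfix.trans (List.drop_suffix p acc).isInfix)

-- if every occurrence of s in L starts at index ≥ k, find on L is find on L.drop k shifted by k
lemma find_shift (L s : List Char) (k : Nat) (hk : ∀ p, s <+: L.drop p → k ≤ p) :
    PySem.Chars.find L s =
      if PySem.Chars.find (L.drop k) s = -1 then -1
      else (k : Int) + PySem.Chars.find (L.drop k) s := by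
  split_ifs with hneg
  · rw [PySem.Chars.find_eq_neg_one_iff] at hneg ⊢
    intro hinf
    apply hneg
    obtain ⟨j, hj⟩ := (PySem.Chars.exists_prefix_drop_iff_isIn s L).mpr
      ((PySem.Chars.isIn_iff_infix s L).mpr hinf)
    have hkj := hk j hj
    rw [← (PySem.Chars.isIn_iff_infix s (L.drop k)), ← PySem.Chars.exists_prefix_drop_iff_isIn]
    refine ⟨j - k, ?_⟩
    rwa [List.drop_drop, Nat.add_sub_cancel' hkj]
  · have hq0 : 0 ≤ PySem.Chars.find (L.drop k) s := by
      have := PySem.Chars.neg_one_le_find (L.drop k) s; omega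
    set q := PySem.Chars.find (L.drop k) s with hqdef
    obtain ⟨hqocc, hqmin⟩ := PySem.Chars.find_spec hq0
    have hLocc : s <+: L.drop (k + q.toNat) := by rwa [List.drop_drop] at hqocc
    have hf0 : 0 ≤ PySem.Chars.find L s := by
      rw [PySem.Chars.find_nonneg_iff]
      exact (hLocc.isInfix).trans (List.drop_suffix _ L).isInfix
    set f := PySem.Chars.find L s with hfdef
    obtain ⟨hfocc, hfmin⟩ := PySem.Chars.find_spec hf0
    have hkf : k ≤ f.toNat := hk _ hfocc
    have h1 : ¬ (k + q.toNat < f.toNat) := fun hlt => hfmin _ hlt hLocc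
    have h2 : ¬ (f.toNat - k < q.toNat) := by
      intro hlt
      apply hqmin _ hlt
      rw [List.drop_drop, Nat.add_sub_cancel' hkf]
      exact hfocc
    omega

-- A's inner scan never falls back from some to none
lemma foldA_some (acc : List Char) (ss : List String) (c : Int) :
    ∃ c', ss.foldl (stepA acc) (some c) = some c' := by
  induction ss generalizing c with
  | nil => exact ⟨c, rfl⟩
  | cons s rest ih =>
    simp only [List.foldl_cons, stepA]
    split_ifs with h h2 <;> exact ih _

-- A's inner scan returns none exactly when no stop string occurs at all
lemma foldA_none (acc : List Char) (ss : List String)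
    (h : ss.foldl (stepA acc) none = none) :
    ∀ s ∈ ss, ¬ s.toList <:+: acc := by
  induction ss with
  | nil => simp
  | cons s rest ih =>
    intro t ht
    simp only [List.foldl_cons] at h
    have hs : PySem.Chars.find acc s.toList = -1 := by
      by_contra hne
      have hstep : stepA acc none s = some (PySem.Chars.find acc s.toList) := by
        simp [stepA, hne]
      rw [hstep] at h
      obtain ⟨c', hc'⟩ := foldA_some acc rest (PySem.Chars.find acc s.toList)
      rw [hc'] at h; simp at h
    have hstep : stepA acc none s = none := by simp [stepA, hs]
    rw [hstep] at h
    rcases List.mem_cons.mp ht with rfl | ht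
    · exact (PySem.Chars.find_eq_neg_one_iff _ _).mp hs
    · exact ih h t ht

-- A's inner scan only produces nonnegative cut indices
lemma foldA_nonneg (acc : List Char) (ss : List String) (c : Int)
    (h : ss.foldl (stepA acc) none = some c) : 0 ≤ c := by
  suffices H : ∀ (e : Option Int), (∀ c0 : Int, e = some c0 → 0 ≤ c0) →
      ss.foldl (stepA acc) e = some c → 0 ≤ c from H none (by simp) h
  clear h
  induction ss with
  | nil => intro e he h; exact he c h
  | cons s rest ih =>
    intro e he h
    simp only [List.foldl_cons] at h
    refine ih (stepA acc e s) ?_ h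
    intro c0 hc0
    have hge : -1 ≤ PySem.Chars.find acc s.toList := PySem.Chars.neg_one_le_find _ _
    cases e with
    | none =>
      simp only [stepA] at hc0
      by_cases hne : PySem.Chars.find acc s.toList = -1
      · rw [if_pos hne] at hc0; exact absurd hc0 (by simp)
      · rw [if_neg hne] at hc0
        simp only [Option.some.injEq] at hc0; omega
    | some e0 =>
      simp only [stepA] at hc0
      by_cases hne : PySem.Chars.find acc s.toList = -1
      · rw [if_pos hne] at hc0; exact he _ hc0
      · rw [if_neg hne] at hc0
        by_cases hlt : PySem.Chars.find acc s.toList < e0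
        · rw [if_pos hlt] at hc0; simp only [Option.some.injEq] at hc0; omega
        · rw [if_neg hlt] at hc0; exact he _ hc0

-- the two inner scans agree when the window covers every possible occurrence start
lemma fold_shift_eq (L : List Char) (k : Nat) (ss : List String)
    (hk : ∀ s ∈ ss, ∀ p, s.toList <+: L.drop p → k ≤ p) :
    ss.foldl (stepA L) none = ss.foldl (stepB (L.drop k) (k : Int)) none := by
  apply PySem.List.foldl_congr_mem
  intro e s hs
  have hfs := find_shift L s.toList k (hk s hs)
  simp only [stepA, stepB]
  by_cases hcase : PySem.Chars.find (L.drop k) s.toList = -1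
  · rw [hfs, if_pos hcase]; simp [hcase]
  · have hi : 0 ≤ PySem.Chars.find (L.drop k) s.toList := by
      have := PySem.Chars.neg_one_le_find (L.drop k) s.toList; omega
    have hidx : PySem.Chars.find L s.toList =
        (k : Int) + PySem.Chars.find (L.drop k) s.toList := by rw [hfs, if_neg hcase]
    have hne : ¬ (PySem.Chars.find L s.toList = -1) := by omega
    rw [if_neg hne, if_neg hcase, hidx]

-- main loop invariant: A's (yielded, acc) state versus B's (old, tail) state
lemma loop_eq (ss : List String) (hss : ss ≠ []) (K : Nat)
    (hlen : ∀ s ∈ ss, s.toList.length ≤ K + 1) :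
    ∀ (streamer : List String) (acc : List Char) (out : List String),
      (acc = [] ∨ ∀ s ∈ ss, ¬ s.toList <:+: acc) →
      emitLoopA (some ss) streamer (acc.length : Int) acc out =
      emitLoopB ss (K : Int) streamer (acc.length : Int) (acc.drop (acc.length - K)) out := by
  intro streamer
  induction streamer with
  | nil => intro acc out _; rfl
  | cons text rest ih =>
    intro acc out hinv
    by_cases htext : text = ""
    · simp only [emitLoopA, emitLoopB, if_pos htext]; exact ih acc out hinv
    · simp only [emitLoopA, emitLoopB, if_neg htext]
      have hle : acc.length - K ≤ acc.length := Nat.sub_le _ _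
      have hwindow : acc.drop (acc.length - K) ++ text.toList
          = (acc ++ text.toList).drop (acc.length - K) :=
        (List.drop_append_of_le_length hle).symm
      have hoffset : (acc.length : Int) - PySem.List.len (acc.drop (acc.length - K))
          = ((acc.length - K : Nat) : Int) := by
        simp [PySem.List.len_eq]
      have hocc : ∀ s ∈ ss, ∀ p, s.toList <+: ((acc ++ text.toList).drop p) →
          (acc.length - K) ≤ p := by
        intro s hs p hp
        rcases hinv with rfl | hinv
        · simp
        · have h1 := occ_lower_bound acc text.toList s.toList (hinv s hs) p hp
          have h2 := hlen s hs
          omega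
      have hfold : earliestStopIndexA (acc ++ text.toList) (some ss)
          = earliestStopIndexB (acc.drop (acc.length - K) ++ text.toList)
              ((acc.length : Int) - PySem.List.len (acc.drop (acc.length - K))) ss := by
        rw [earliestA_eq, if_neg hss, earliestB_eq, hwindow, hoffset]
        exact fold_shift_eq (acc ++ text.toList) (acc.length - K) ss hocc
      rw [hfold]
      cases hres : earliestStopIndexB (acc.drop (acc.length - K) ++ text.toList)
          ((acc.length : Int) - PySem.List.len (acc.drop (acc.length - K))) ss with
      | none =>
        -- no stop occurs in acc ++ text: recurse with the stronger invariant
        have hnone : (ss.foldl (stepA (acc ++ text.toList)) none) = none := by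
          have := hfold.trans hres
          rwa [earliestA_eq, if_neg hss] at this
        have hinv' := foldA_none _ _ hnone
        have hrec := ih (acc ++ text.toList) (out ++ [text]) (Or.inr hinv')
        have hyield : (acc.length : Int) + PySem.Str.len text
            = ((acc ++ text.toList).length : Int) := by
          simp [PySem.Str.len_eq]
        have htail : (if (K : Int) = 0 then ([] : List Char)
              else PySem.List.slice (acc.drop (acc.length - K) ++ text.toList)
                (some (-(K : Int))) none)
            = (acc ++ text.toList).drop ((acc ++ text.toList).length - K) := by
          by_cases hK : K = 0
          · subst hK; simp
          · rw [if_neg (by exact_mod_cast hK), hwindow,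
                PySem.List.slice_from_neg_natCast _ K (Nat.pos_of_ne_zero hK),
                List.drop_drop]
            congr 1
            simp only [List.length_drop, List.length_append]
            have ht1 : 0 < text.toList.length := by
              rcases Nat.eq_zero_or_pos text.toList.length with h0 | h0
              · exact absurd (String.toList_eq_nil_iff.mp (List.eq_nil_of_length_eq_zero h0)) htext
              · exact h0
            omega
        dsimp only
        rw [← hyield, ← htail] at hrec
        exact hrec
      | some cut =>
        have hcut0 : 0 ≤ cut := by
          have := hfold.trans hres
          rw [earliestA_eq, if_neg hss] at this
          exact foldA_nonneg _ _ _ this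
        have hchunk : PySem.List.slice
              (PySem.List.slice (acc ++ text.toList) none (some cut))
              (some (acc.length : Int)) none
            = List.take (cut.toNat - acc.length) text.toList := by
          rw [PySem.List.slice_to _ hcut0, PySem.List.slice_from _ (by positivity),
              Int.toNat_natCast, List.drop_take, List.drop_left]
        dsimp only
        rw [hchunk]
        by_cases hlt : (acc.length : Int) < cut
        · have htk : cut.toNat - acc.length = (cut - (acc.length : Int)).toNat := by omega
          have hne : List.take (cut.toNat - acc.length) text.toList ≠ [] := by
            intro hcon
            rcases List.take_eq_nil_iff.mp hcon with h | h
            · omega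
            · exact htext (String.toList_eq_nil_iff.mp h)
          rw [if_neg hne, if_pos hlt, PySem.List.slice_to _ (by omega), htk]
        · have htk : cut.toNat - acc.length = 0 := by omega
          rw [htk, List.take_zero, if_pos rfl, if_neg hlt]

-- A with no stop strings yields exactly the nonempty texts
lemma loopA_nostop (stop : Option (List String))
    (h : ∀ L, earliestStopIndexA L stop = none) :
    ∀ (streamer : List String) (yielded : Int) (acc : List Char) (out : List String),
      emitLoopA stop streamer yielded acc out =
      streamer.foldl (fun out t => if t = "" then out else out ++ [t]) out := by
  intro streamer
  induction streamer with
  | nil => intro yielded acc out; rfl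
  | cons text rest ih =>
    intro yielded acc out
    by_cases htext : text = ""
    · simp only [emitLoopA, if_pos htext, List.foldl_cons, ih]
    · simp only [emitLoopA, if_neg htext, h, List.foldl_cons, ih]

-- maximum fact for B's max_len accumulation
lemma le_maxLen (ss : List String) :
    0 ≤ ss.foldl (fun m s => max m (PySem.Str.len s)) 0 ∧
    ∀ s ∈ ss, PySem.Str.len s ≤ ss.foldl (fun m s => max m (PySem.Str.len s)) 0 := by
  have h : ss.foldl (fun m s => max m (PySem.Str.len s)) 0
      = (ss.map PySem.Str.len).foldl max 0 := List.foldl_map.symm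
  rw [h]
  obtain ⟨h1, h2⟩ := PySem.List.le_foldl_max (ss.map PySem.Str.len) 0
  exact ⟨h1, fun s hs => h2 _ (List.mem_map_of_mem hs)⟩

-- ===== VERDICT (by name: the statement is the Claim_ definition above) =====
theorem emit_stream_chunks_spec : Claim_equal_emit_stream_chunks := by
  unfold Claim_equal_emit_stream_chunks
  intro streamer stop _
  unfold Spec_emit_stream_chunks
  cases stop with
  | none =>
    show emit_stream_chunks streamer none = _
    rw [emit_stream_chunks, loopA_nostop none (fun L => rfl)]
    rfl
  | some ss =>
    by_cases hss : ss = []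
    · subst hss
      show emit_stream_chunks streamer (some []) = _
      rw [emit_stream_chunks, loopA_nostop (some []) (fun L => rfl)]
      rfl
    · have hB : emit_stream_chunks_alt streamer (some ss)
          = emitLoopB ss (if 0 < ss.foldl (fun m s => max m (PySem.Str.len s)) 0
              then ss.foldl (fun m s => max m (PySem.Str.len s)) 0 - 1 else 0)
              streamer 0 [] [] := by
        rw [emit_stream_chunks_alt]
        simp only [if_neg hss]
      obtain ⟨hm0, hmle⟩ := le_maxLen ss
      set maxLen := ss.foldl (fun m s => max m (PySem.Str.len s)) 0 with hmdef
      set keep := if 0 < maxLen then maxLen - 1 else 0 with hkdef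
      have hk0 : 0 ≤ keep := by rw [hkdef]; split_ifs <;> omega
      have hK : ((keep.toNat : Nat) : Int) = keep := Int.toNat_of_nonneg hk0
      have hlen : ∀ s ∈ ss, s.toList.length ≤ keep.toNat + 1 := by
        intro s hs
        have h1 := hmle s hs
        rw [PySem.Str.len_eq] at h1
        rw [hkdef] at hK ⊢
        split_ifs at hK ⊢ with hpos
        · omega
        · omega
      have hmain := loop_eq ss hss keep.toNat hlen streamer [] [] (Or.inl rfl)
      rw [hK] at hmain
      simp only [List.length_nil, Nat.cast_zero, Nat.zero_sub, List.drop_nil] at hmain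
      rw [emit_stream_chunks, hmain, hB]
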